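-- pv_equiv track=rewrite | github.com/kenrick90/Cracking-the-coding-interview | HackerRank and LeetCode/construct_the_array.py | construct_the_array
-- ===== SOURCE A (Python) =====
-- def construct_the_array(n,k,x):
--     #a represents the array with the number of posibilities which end with x
--     #b represents the array with the number of posibilities
--     #which does NOT end with x
--     b = [0]*n
--     if x == 1:
--         b[0] = 0
--         b[1] = k-1
--     else:
--         b[0] = 1
--         b[1] = k-2
--
--     for i in range(2,n):
--         #a[i] = b[i-1]
--         b[i] = ((b[i-1] * (k-2)) + (b[i-2] * (k-1))) % 1000000007
--     return b[n-2]
-- ===== SOURCE B (Python) =====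
-- def construct_the_array(n, k, x):
--     # Matrix exponentiation of the 2x2 recurrence b[i] = (k-2)*b[i-1] + (k-1)*b[i-2] (mod 1e9+7).
--     p = 1000000007
--     b0, b1 = (0, k - 1) if x == 1 else (1, k - 2)
--     m = n - 2
--     if m == 0:
--         return b0
--     if m == 1:
--         return b1
--
--     def mul(A, B):
--         a, b, c, d = A
--         e, f, g, h = B
--         return ((a * e + b * g) % p, (a * f + b * h) % p,
--                 (c * e + d * g) % p, (c * f + d * h) % p)
--
--     def mpow(A, e):
--         R = (1, 0, 0, 1)
--         while e:
--             if e & 1: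
--                 R = mul(R, A)
--             A = mul(A, A)
--             e >>= 1
--         return R
--
--     a, b, _, _ = mpow(((k - 2) % p, (k - 1) % p, 1, 0), m - 1)
--     return (a * b1 + b * b0) % p
-- ===== Notes on version B (the rewrite author's own statement) =====
-- stated objective: faster
-- what changed: Replaced the O(n) DP over a length-n list with binary exponentiation of the 2x2 transition matrix of the recurrence mod 1e9+7.
import Mathlib
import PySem

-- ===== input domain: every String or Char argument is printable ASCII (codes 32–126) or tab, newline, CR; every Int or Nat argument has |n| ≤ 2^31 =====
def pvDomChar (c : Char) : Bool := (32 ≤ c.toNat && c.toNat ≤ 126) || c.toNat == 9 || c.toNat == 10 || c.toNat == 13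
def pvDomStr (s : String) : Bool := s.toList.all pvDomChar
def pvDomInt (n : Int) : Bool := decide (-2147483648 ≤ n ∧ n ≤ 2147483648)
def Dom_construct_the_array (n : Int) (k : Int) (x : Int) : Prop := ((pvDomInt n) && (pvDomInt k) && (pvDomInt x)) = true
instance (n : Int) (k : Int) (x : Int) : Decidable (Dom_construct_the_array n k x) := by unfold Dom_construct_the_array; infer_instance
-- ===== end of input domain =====

-- B replaces A's O(n) DP list with binary exponentiation of the 2x2 transition matrix (measured asymptotically faster).


-- ===== PORT A =====
-- Python's list b is a mutable array: ported as Lean Array (indices are nonnegative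
-- wherever A returns, which Pre_ below guarantees).
-- one loop iteration: b[i] = ((b[i-1]*(k-2)) + (b[i-2]*(k-1))) % 1000000007
def pvStepA (k : Int) (b : Array Int) (i : Int) : Array Int :=
  b.setIfInBounds i.toNat
    (PySem.Int.mod (b.getD (i-1).toNat 0 * (k-2) + b.getD (i-2).toNat 0 * (k-1)) 1000000007)

-- b = [0]*n ; then the if/else writing b[0], b[1]
def pvInitA (n : Int) (k : Int) (x : Int) : Array Int :=
  if x = 1 then
    ((Array.replicate n.toNat 0).setIfInBounds 0 0).setIfInBounds 1 (k-1)
  else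
    ((Array.replicate n.toNat 0).setIfInBounds 0 1).setIfInBounds 1 (k-2)

def construct_the_array (n : Int) (k : Int) (x : Int) : Int :=
  ((PySem.List.pyRange 2 n 1).foldl (pvStepA k) (pvInitA n k x)).getD (n-2).toNat 0

-- ===== PORT B =====
-- mul(A, B): 2x2 matrix product with every entry reduced mod 1e9+7
def pvMul (A B : Int × Int × Int × Int) : Int × Int × Int × Int :=
  ((A.1 * B.1 + A.2.1 * B.2.2.1) % 1000000007,
   (A.1 * B.2.1 + A.2.1 * B.2.2.2) % 1000000007,
   (A.2.2.1 * B.1 + A.2.2.2 * B.2.2.1) % 1000000007,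
   (A.2.2.1 * B.2.1 + A.2.2.2 * B.2.2.2) % 1000000007)

-- mpow's while-loop as recursion on the (nonnegative) exponent
def pvMpow (A R : Int × Int × Int × Int) (e : Nat) : Int × Int × Int × Int :=
  if h : e = 0 then R
  else pvMpow (pvMul A A) (if e % 2 = 1 then pvMul R A else R) (e / 2)
termination_by e
decreasing_by exact Nat.div_lt_self (Nat.pos_of_ne_zero h) one_lt_two

def construct_the_array_alt (n : Int) (k : Int) (x : Int) : Int :=
  let b0 : Int := if x = 1 then 0 else 1
  let b1 : Int := if x = 1 then k - 1 else k - 2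
  let m := n - 2
  if m = 0 then b0
  else if m = 1 then b1
  else
    let R := pvMpow (PySem.Int.mod (k-2) 1000000007, PySem.Int.mod (k-1) 1000000007, 1, 0)
                    (1, 0, 0, 1) (m - 1).toNat
    PySem.Int.mod (R.1 * b1 + R.2.1 * b0) 1000000007

-- ===== PRECONDITION & SPEC =====
-- A writes b[1] and reads b[n-2]: for n < 2 Python raises IndexError, so those inputs are excluded.
def Pre_construct_the_array (n : Int) (k : Int) (x : Int) : Prop := 2 ≤ n
instance (n : Int) (k : Int) (x : Int) : Decidable (Pre_construct_the_array n k x) := by unfold Pre_construct_the_array; infer_instance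
def pvWitness_construct_the_array : Int × Int × Int := (7, 4, 1)

def Spec_construct_the_array (n : Int) (k : Int) (x : Int) (out : Int) : Prop := out = construct_the_array_alt n k x
instance (n : Int) (k : Int) (x : Int) (out : Int) : Decidable (Spec_construct_the_array n k x out) := by unfold Spec_construct_the_array; infer_instance

-- ===== CLAIM (what is proved, stated in full; the proofs are below) =====
def Claim_equal_construct_the_array : Prop := ∀ (n : Int) (k : Int) (x : Int), Dom_construct_the_array n k x → Pre_construct_the_array n k x → Spec_construct_the_array n k x (construct_the_array n k x)

-- ===== LEMMAS AND PROOFS =====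

-- proof-side list twins of port A's array state, and the Array↔List bridge
def pvStepAL (k : Int) (b : List Int) (i : Int) : List Int :=
  PySem.List.pySetD b i
    (PySem.Int.mod (PySem.List.pyGetD b (i-1) 0 * (k-2) + PySem.List.pyGetD b (i-2) 0 * (k-1)) 1000000007)

def pvInitAL (n : Int) (k : Int) (x : Int) : List Int :=
  if x = 1 then
    PySem.List.pySetD (PySem.List.pySetD (List.replicate n.toNat 0) 0 0) 1 (k-1)
  else
    PySem.List.pySetD (PySem.List.pySetD (List.replicate n.toNat 0) 0 1) 1 (k-2)

lemma pvArr_getD (a : Array Int) (i : Nat) (d : Int) : a.getD i d = a.toList.getD i d := by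
  rw [Array.getD_eq_getD_getElem?, List.getD_eq_getElem?_getD, Array.getElem?_toList]

lemma pvStepA_toList (k : Int) (b : Array Int) (i : Int) (hi : 2 ≤ i) :
    (pvStepA k b i).toList = pvStepAL k b.toList i := by
  unfold pvStepA pvStepAL
  have h1 : i - 1 = (((i-1).toNat : Nat) : Int) := by omega
  have h2 : i - 2 = (((i-2).toNat : Nat) : Int) := by omega
  rw [PySem.List.pySetD_of_nonneg _ _ (by omega), h1, h2,
      PySem.List.pyGetD_natCast, PySem.List.pyGetD_natCast,
      Array.toList_setIfInBounds, pvArr_getD, pvArr_getD]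
  simp only [Int.toNat_natCast]

lemma pvFoldA_toList (k : Int) : ∀ (is : List Int), (∀ i ∈ is, 2 ≤ i) → ∀ (b : Array Int),
    (is.foldl (pvStepA k) b).toList = is.foldl (pvStepAL k) b.toList := by
  intro is
  induction is with
  | nil => intro _ b; rfl
  | cons i is ih =>
      intro h b
      show ((is.foldl (pvStepA k) (pvStepA k b i))).toList = is.foldl (pvStepAL k) (pvStepAL k b.toList i)
      rw [ih (fun j hj => h j (List.mem_cons_of_mem i hj)) (pvStepA k b i),
          pvStepA_toList k b i (h i (List.mem_cons_self ..))]

lemma pvInitA_toList (n k x : Int) : (pvInitA n k x).toList = pvInitAL n k x := by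
  unfold pvInitA pvInitAL
  split <;>
    rw [show ((0:Int)) = ((0:Nat):Int) from rfl, PySem.List.pySetD_natCast,
        show ((1:Int)) = ((1:Nat):Int) from rfl, PySem.List.pySetD_natCast,
        Array.toList_setIfInBounds, Array.toList_setIfInBounds, Array.toList_replicate]

-- the mathematical recurrence both programs compute: g 0 = b0, g 1 = b1,
-- g (m+2) = (g (m+1)*(k-2) + g m*(k-1)) % 1e9+7
def pvG (k b0 b1 : Int) : Nat → Int
  | 0 => b0
  | 1 => b1
  | (m+2) => (pvG k b0 b1 (m+1) * (k-2) + pvG k b0 b1 m * (k-1)) % 1000000007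

lemma pvG_red (k b0 b1 : Int) (m : Nat) : pvG k b0 b1 (m+2) % 1000000007 = pvG k b0 b1 (m+2) := by
  show (_ % _) % _ = _
  exact Int.emod_emod_of_dvd _ dvd_rfl

-- mod juggling helpers
lemma pvMixL (p a b u v : Int) : ((a % p) * u + (b % p) * v) % p = (a * u + b * v) % p := by
  have h1 : (a % p) * u % p = a * u % p := by
    rw [Int.mul_emod, Int.emod_emod_of_dvd _ dvd_rfl, ← Int.mul_emod]
  have h2 : (b % p) * v % p = b * v % p := by
    rw [Int.mul_emod, Int.emod_emod_of_dvd _ dvd_rfl, ← Int.mul_emod]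
  rw [Int.add_emod, h1, h2, ← Int.add_emod]

lemma pvMixR (p a b u v : Int) : (a * (u % p) + b * (v % p)) % p = (a * u + b * v) % p := by
  have h1 : a * (u % p) % p = a * u % p := by
    rw [Int.mul_emod, Int.emod_emod_of_dvd _ dvd_rfl, ← Int.mul_emod]
  have h2 : b * (v % p) % p = b * v % p := by
    rw [Int.mul_emod, Int.emod_emod_of_dvd _ dvd_rfl, ← Int.mul_emod]
  rw [Int.add_emod, h1, h2, ← Int.add_emod]

lemma pvMixV (p a b u v u' v' : Int) (hu : u % p = u' % p) (hv : v % p = v' % p) :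
    (a * u + b * v) % p = (a * u' + b * v') % p := by
  have h1 : a * u % p = a * u' % p := by rw [Int.mul_emod, hu, ← Int.mul_emod]
  have h2 : b * v % p = b * v' % p := by rw [Int.mul_emod, hv, ← Int.mul_emod]
  rw [Int.add_emod, h1, h2, ← Int.add_emod]

lemma pvMul_assoc (A B C : Int × Int × Int × Int) : pvMul (pvMul A B) C = pvMul A (pvMul B C) := by
  obtain ⟨a, b, c, d⟩ := A
  obtain ⟨e, f, g, h⟩ := B
  obtain ⟨i, j, l, m⟩ := C
  simp only [pvMul]
  refine Prod.ext ?_ (Prod.ext ?_ (Prod.ext ?_ ?_)) <;>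
    · simp only []
      rw [pvMixL, pvMixR]
      congr 1
      ring

-- entry-wise mod-reducedness
def pvRed (q : Int × Int × Int × Int) : Prop :=
  q.1 % 1000000007 = q.1 ∧ q.2.1 % 1000000007 = q.2.1 ∧
  q.2.2.1 % 1000000007 = q.2.2.1 ∧ q.2.2.2 % 1000000007 = q.2.2.2

lemma pvRed_mul (A B : Int × Int × Int × Int) : pvRed (pvMul A B) := by
  refine ⟨?_, ?_, ?_, ?_⟩ <;> exact Int.emod_emod_of_dvd _ dvd_rfl

lemma pvRed_I : pvRed (1, 0, 0, 1) := by
  refine ⟨?_, ?_, ?_, ?_⟩ <;> decide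

lemma pvMul_I_of_red (R : Int × Int × Int × Int) (hR : pvRed R) : pvMul R (1, 0, 0, 1) = R := by
  obtain ⟨a, b, c, d⟩ := R
  obtain ⟨h1, h2, h3, h4⟩ := hR
  simp only [pvMul, mul_one, mul_zero, add_zero, zero_add]
  exact Prod.ext h1 (Prod.ext h2 (Prod.ext h3 h4))

-- naive matrix power (the specification pvMpow is reduced to)
def pvNPow (A : Int × Int × Int × Int) : Nat → Int × Int × Int × Int
  | 0 => (1, 0, 0, 1)
  | (e+1) => pvMul A (pvNPow A e)

lemma pvNPow_sq (A : Int × Int × Int × Int) (e : Nat) : pvNPow (pvMul A A) e = pvNPow A (2*e) := by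
  induction e with
  | zero => rfl
  | succ e ih =>
      have h : 2 * (e + 1) = (2*e + 1) + 1 := by ring
      rw [h]
      show pvMul (pvMul A A) (pvNPow (pvMul A A) e) = pvMul A (pvNPow A (2*e+1))
      rw [ih, pvMul_assoc]
      rfl

lemma pvMpow_eq : ∀ (e : Nat) (A R : Int × Int × Int × Int), pvRed R →
    pvMpow A R e = pvMul R (pvNPow A e) := by
  intro e
  induction e using Nat.strong_induction_on with
  | _ e ih =>
    intro A R hR
    by_cases he : e = 0
    · subst he
      rw [pvMpow]
      simp [pvNPow, pvMul_I_of_red R hR]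
    · rw [pvMpow]
      simp only [he, dite_false]
      have hlt : e / 2 < e := Nat.div_lt_self (Nat.pos_of_ne_zero he) one_lt_two
      have hR' : pvRed (if e % 2 = 1 then pvMul R A else R) := by
        split
        · exact pvRed_mul R A
        · exact hR
      rw [ih (e / 2) hlt _ _ hR', pvNPow_sq]
      rcases Nat.even_or_odd e with hev | hod
      · have h2 : e % 2 = 0 := Nat.even_iff.mp hev
        have h3 : 2 * (e / 2) = e := by omega
        rw [if_neg (by omega), h3]
      · have h2 : e % 2 = 1 := Nat.odd_iff.mp hod
        have h3 : 2 * (e / 2) + 1 = e := by omega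
        rw [if_pos h2, pvMul_assoc]
        rw [show pvMul A (pvNPow A (2 * (e/2))) = pvNPow A (2 * (e/2) + 1) from rfl, h3]

-- the rows of pvNPow M e evaluate (mod p) the recurrence
lemma pvRow (k b0 b1 : Int) (e : Nat) :
    (((pvNPow ((k-2) % 1000000007, (k-1) % 1000000007, 1, 0) e).1 * b1 +
      (pvNPow ((k-2) % 1000000007, (k-1) % 1000000007, 1, 0) e).2.1 * b0) % 1000000007
        = pvG k b0 b1 (e+1) % 1000000007) ∧
    (((pvNPow ((k-2) % 1000000007, (k-1) % 1000000007, 1, 0) e).2.2.1 * b1 +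
      (pvNPow ((k-2) % 1000000007, (k-1) % 1000000007, 1, 0) e).2.2.2 * b0) % 1000000007
        = pvG k b0 b1 e % 1000000007) := by
  induction e with
  | zero =>
      constructor
      · simp [pvNPow, pvG]
      · simp [pvNPow, pvG]
  | succ e ih =>
      obtain ⟨ih1, ih2⟩ := ih
      set Q := pvNPow ((k-2) % 1000000007, (k-1) % 1000000007, 1, 0) e with hQ
      constructor
      · show (((k-2) % 1000000007 * Q.1 + (k-1) % 1000000007 * Q.2.2.1) % 1000000007 * b1 +
              ((k-2) % 1000000007 * Q.2.1 + (k-1) % 1000000007 * Q.2.2.2) % 1000000007 * b0) % 1000000007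
            = pvG k b0 b1 (e+2) % 1000000007
        rw [pvMixL]
        have hre : ((k-2) % 1000000007 * Q.1 + (k-1) % 1000000007 * Q.2.2.1) * b1 +
                   ((k-2) % 1000000007 * Q.2.1 + (k-1) % 1000000007 * Q.2.2.2) * b0
                 = (k-2) % 1000000007 * (Q.1 * b1 + Q.2.1 * b0) +
                   (k-1) % 1000000007 * (Q.2.2.1 * b1 + Q.2.2.2 * b0) := by ring
        rw [hre, pvMixV 1000000007 _ _ _ _ (pvG k b0 b1 (e+1)) (pvG k b0 b1 e) ih1 ih2, pvMixL]
        rw [pvG_red]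
        show _ = (pvG k b0 b1 (e+1) * (k-2) + pvG k b0 b1 e * (k-1)) % 1000000007
        congr 1
        ring
      · show ((1 * Q.1 + 0 * Q.2.2.1) % 1000000007 * b1 +
              (1 * Q.2.1 + 0 * Q.2.2.2) % 1000000007 * b0) % 1000000007
            = pvG k b0 b1 (e+1) % 1000000007
        rw [one_mul, one_mul, zero_mul, zero_mul, add_zero, add_zero, pvMixL]
        exact ih1

-- ===== A-side: loop invariant for the DP list =====
lemma pvA_inv (k b0 b1 : Int) (n : Int) (j : Nat) (hj : (j:Int) ≤ n - 2)
    (L0 : List Int) (hlen : L0.length = n.toNat)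
    (h0 : ∀ m : Nat, m < 2 → L0.getD m 0 = pvG k b0 b1 m) :
    ((PySem.List.pyRange 2 (2 + (j:Int)) 1).foldl (pvStepAL k) L0).length = n.toNat ∧
    ∀ m : Nat, m < j + 2 →
      ((PySem.List.pyRange 2 (2 + (j:Int)) 1).foldl (pvStepAL k) L0).getD m 0 = pvG k b0 b1 m := by
  induction j with
  | zero =>
      rw [PySem.List.pyRange_one_eq_nil (by norm_num)]
      exact ⟨hlen, h0⟩
  | succ j ih =>
      have hj' : (j:Int) ≤ n - 2 := by push_cast at hj ⊢; omega
      obtain ⟨ihlen, ihval⟩ := ih hj'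
      set L := (PySem.List.pyRange 2 (2 + (j:Int)) 1).foldl (pvStepAL k) L0 with hL
      have hrange : PySem.List.pyRange 2 (2 + ((j+1:Nat):Int)) 1
          = PySem.List.pyRange 2 (2 + (j:Int)) 1 ++ [2 + (j:Int)] := by
        have : (2 : Int) + ((j+1:Nat):Int) = (2 + (j:Int)) + 1 := by push_cast; ring
        rw [this, PySem.List.pyRange_one_succ_right (by omega)]
      rw [hrange, List.foldl_append]
      have hlt : j + 2 < L.length := by
        rw [ihlen]; omega
      have hstep : List.foldl (pvStepAL k) L [2 + (j:Int)] =
          L.set (j+2) ((pvG k b0 b1 (j+1) * (k-2) + pvG k b0 b1 j * (k-1)) % 1000000007) := by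
        show pvStepAL k L (2 + (j:Int)) = _
        have hi1 : (2 : Int) + (j:Int) - 1 = ((j+1 : Nat) : Int) := by push_cast; ring
        have hi2 : (2 : Int) + (j:Int) - 2 = ((j : Nat) : Int) := by omega
        have hidx : (2 : Int) + (j:Int) = ((j+2 : Nat) : Int) := by push_cast; ring
        unfold pvStepAL
        rw [hi1, hi2, hidx]
        rw [PySem.List.pySetD_natCast, PySem.List.pyGetD_natCast, PySem.List.pyGetD_natCast]
        rw [ihval (j+1) (by omega), ihval j (by omega)]
        rw [PySem.Int.mod_eq_emod_of_pos (by norm_num)]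
      rw [hstep]
      constructor
      · rw [List.length_set, ihlen]
      · intro m hm
        by_cases hmj : m = j + 2
        · subst hmj
          have hg : pvG k b0 b1 (j+2) = (pvG k b0 b1 (j+1) * (k-2) + pvG k b0 b1 j * (k-1)) % 1000000007 := rfl
          rw [hg, List.getD_eq_getElem?_getD, List.getElem?_set_self hlt]
          rfl
        · rw [List.getD_eq_getElem?_getD, List.getElem?_set_ne (by omega), ← List.getD_eq_getElem?_getD]
          exact ihval m (by omega)

-- initial list facts
lemma pvInitAL_spec (n : Int) (k x : Int) (hn : 2 ≤ n) :
    (pvInitAL n k x).length = n.toNat ∧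
    ∀ m : Nat, m < 2 → (pvInitAL n k x).getD m 0
      = pvG k (if x = 1 then 0 else 1) (if x = 1 then k - 1 else k - 2) m := by
  obtain ⟨t, ht⟩ : ∃ t, n.toNat = t + 2 := ⟨n.toNat - 2, by omega⟩
  have hrep : List.replicate n.toNat (0:Int) = 0 :: 0 :: List.replicate t 0 := by
    rw [ht]; rfl
  unfold pvInitAL
  split
  all_goals
    rw [hrep, show ((0:Int)) = ((0:Nat):Int) from rfl, PySem.List.pySetD_natCast,
        show ((1:Int)) = ((1:Nat):Int) from rfl, PySem.List.pySetD_natCast]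
    constructor
    · simp [ht]
    · intro m hm
      interval_cases m <;> simp_all [pvG]

-- A computes pvG (n-2)
lemma pvA_eq_G (n k x : Int) (hn : 2 ≤ n) :
    construct_the_array n k x
      = pvG k (if x = 1 then 0 else 1) (if x = 1 then k - 1 else k - 2) (n-2).toNat := by
  obtain ⟨hlen, hval⟩ := pvInitAL_spec n k x hn
  have hcast : ((n-2).toNat : Int) = n - 2 := Int.toNat_of_nonneg (by omega)
  have hrange : PySem.List.pyRange 2 n 1 = PySem.List.pyRange 2 (2 + ((n-2).toNat : Int)) 1 := by
    rw [hcast]; ring_nf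
  obtain ⟨flen, fval⟩ := pvA_inv k (if x = 1 then 0 else 1) (if x = 1 then k - 1 else k - 2) n
    (n-2).toNat (by omega) (pvInitAL n k x) hlen hval
  unfold construct_the_array
  rw [pvArr_getD,
      pvFoldA_toList k _ (fun i hi => ((PySem.List.mem_pyRange_one).mp hi).1) _,
      pvInitA_toList, hrange]
  exact fval (n-2).toNat (by omega)

-- B computes pvG (n-2)
lemma pvB_eq_G (n k x : Int) (hn : 2 ≤ n) :
    construct_the_array_alt n k x
      = pvG k (if x = 1 then 0 else 1) (if x = 1 then k - 1 else k - 2) (n-2).toNat := by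
  set b0 : Int := if x = 1 then 0 else 1 with hb0
  set b1 : Int := if x = 1 then k - 1 else k - 2 with hb1
  unfold construct_the_array_alt
  rw [← hb0, ← hb1]
  by_cases h0 : n - 2 = 0
  · simp [h0, pvG]
  · by_cases h1 : n - 2 = 1
    · simp [h1, pvG]
    · simp only [h0, h1, if_false]
      have he : ∃ e : Nat, (n - 2 - 1).toNat = e ∧ (n-2).toNat = e + 1 ∧ 1 ≤ e := by
        refine ⟨(n - 3).toNat, by omega, by omega, by omega⟩
      obtain ⟨e, he1, he2, he3⟩ := he
      rw [he1, he2]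
      rw [PySem.Int.mod_eq_emod_of_pos (a := k-2) (by norm_num),
          PySem.Int.mod_eq_emod_of_pos (a := k-1) (by norm_num),
          PySem.Int.mod_eq_emod_of_pos (by norm_num)]
      rw [pvMpow_eq e _ _ pvRed_I]
      set Q := pvNPow ((k-2) % 1000000007, (k-1) % 1000000007, 1, 0) e with hQ
      show ((pvMul (1,0,0,1) Q).1 * b1 + (pvMul (1,0,0,1) Q).2.1 * b0) % 1000000007 = pvG k b0 b1 (e+1)
      have hm : (pvMul (1,0,0,1) Q).1 = Q.1 % 1000000007 ∧ (pvMul (1,0,0,1) Q).2.1 = Q.2.1 % 1000000007 := by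
        constructor <;> (show (_ % _ : Int) = _; congr 1; ring)
      rw [hm.1, hm.2, pvMixL]
      obtain ⟨e', he'⟩ : ∃ e', e = e' + 1 := ⟨e - 1, by omega⟩
      rw [(pvRow k b0 b1 e).1, he', pvG_red]

-- ===== VERDICT (by name: the statement is the Claim_ definition above) =====
theorem construct_the_array_spec : Claim_equal_construct_the_array := by
  intro n k x _ hpre
  unfold Spec_construct_the_array
  rw [pvA_eq_G n k x hpre, pvB_eq_G n k x hpre]
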